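-- pv_equiv track=rewrite | github.com/HongyiZhu/PycharmProjects | ActivityCNN/DataGeneration.py | get_tuple_list
-- ===== SOURCE A (Python) =====
-- def get_tuple_list(human_t, object_t):
--     humans = []
--     objects = []
--
--     temp1 = [(x, y, z, w) for (x, y, z, w) in human_t]
--     temp2 = [(x, y, z, w) for (x, y, z, w) in object_t]
--     humans.append(temp1)
--     objects.append(temp2)
--
--     temp1 = [(x, z, y, w) for (x, y, z, w) in human_t]
--     temp2 = [(x, z, y, w) for (x, y, z, w) in object_t]
--     humans.append(temp1)
--     objects.append(temp2)
--
--     temp1 = [(y, z, x, w) for (x, y, z, w) in human_t]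
--     temp2 = [(y, z, x, w) for (x, y, z, w) in object_t]
--     humans.append(temp1)
--     objects.append(temp2)
--
--     temp1 = [(y, x, z, w) for (x, y, z, w) in human_t]
--     temp2 = [(y, x, z, w) for (x, y, z, w) in object_t]
--     humans.append(temp1)
--     objects.append(temp2)
--
--     temp1 = [(z, x, y, w) for (x, y, z, w) in human_t]
--     temp2 = [(z, x, y, w) for (x, y, z, w) in object_t]
--     humans.append(temp1)
--     objects.append(temp2)
--
--     temp1 = [(z, y, x, w) for (x, y, z, w) in human_t]
--     temp2 = [(z, y, x, w) for (x, y, z, w) in object_t]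
--     humans.append(temp1)
--     objects.append(temp2)
--
--     return humans, objects
-- ===== SOURCE B (Python) =====
-- def _six_variants(tuples):
--     # one pass; six accumulators; variants generated per tuple by cyclic
--     # rotation of (x, y, z): each rotation gives (a,b,c,w) and (a,c,b,w).
--     c0, c1, c2, c3, c4, c5 = [], [], [], [], [], []
--     for (x, y, z, w) in tuples:
--         a, b, c = x, y, z
--         c0.append((a, b, c, w))
--         c1.append((a, c, b, w))
--         a, b, c = b, c, a
--         c2.append((a, b, c, w))
--         c3.append((a, c, b, w))
--         a, b, c = b, c, a
--         c4.append((a, b, c, w))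
--         c5.append((a, c, b, w))
--     return [c0, c1, c2, c3, c4, c5]
--
-- def get_tuple_list(human_t, object_t):
--     return _six_variants(human_t), _six_variants(object_t)
-- ===== Notes on version B (the rewrite author's own statement) =====
-- stated objective: alternative
-- what changed: Replaced six staged comprehension passes with a single pass over each input that maintains six accumulators at once, generating each tuple's variants by cyclic rotation of (x,y,z) (each rotation yields the rotation itself and its last-two-swapped form).
import Mathlib
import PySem

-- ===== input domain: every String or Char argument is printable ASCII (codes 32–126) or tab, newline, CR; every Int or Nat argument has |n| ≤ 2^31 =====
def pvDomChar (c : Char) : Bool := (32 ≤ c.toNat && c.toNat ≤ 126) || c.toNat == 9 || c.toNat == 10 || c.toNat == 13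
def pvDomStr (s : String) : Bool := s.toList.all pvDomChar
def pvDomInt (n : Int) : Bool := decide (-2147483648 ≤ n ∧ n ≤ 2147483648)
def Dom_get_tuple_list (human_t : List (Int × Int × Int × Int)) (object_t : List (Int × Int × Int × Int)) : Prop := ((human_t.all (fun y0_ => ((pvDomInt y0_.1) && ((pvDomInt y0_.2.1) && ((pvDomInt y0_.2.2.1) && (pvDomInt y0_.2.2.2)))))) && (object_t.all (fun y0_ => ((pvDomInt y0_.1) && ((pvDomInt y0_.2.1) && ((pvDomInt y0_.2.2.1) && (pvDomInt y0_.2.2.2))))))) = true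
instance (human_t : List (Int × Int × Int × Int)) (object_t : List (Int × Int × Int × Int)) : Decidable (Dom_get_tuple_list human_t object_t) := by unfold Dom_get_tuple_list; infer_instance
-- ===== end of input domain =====

-- B replaces six staged passes by one pass with six accumulators, variants built by cyclic rotation; objective: alternative.

-- ===== PORT A =====
-- literal transliteration: twelve comprehensions, appended pairwise
def get_tuple_list (human_t : List (Int × Int × Int × Int)) (object_t : List (Int × Int × Int × Int)) : (List (List (Int × Int × Int × Int))) × (List (List (Int × Int × Int × Int))) :=
  let humans : List (List (Int × Int × Int × Int)) := []
  let objects : List (List (Int × Int × Int × Int)) := []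
  let temp1 := human_t.map (fun (x, y, z, w) => (x, y, z, w))
  let temp2 := object_t.map (fun (x, y, z, w) => (x, y, z, w))
  let humans := humans ++ [temp1]
  let objects := objects ++ [temp2]
  let temp1 := human_t.map (fun (x, y, z, w) => (x, z, y, w))
  let temp2 := object_t.map (fun (x, y, z, w) => (x, z, y, w))
  let humans := humans ++ [temp1]
  let objects := objects ++ [temp2]
  let temp1 := human_t.map (fun (x, y, z, w) => (y, z, x, w))
  let temp2 := object_t.map (fun (x, y, z, w) => (y, z, x, w))
  let humans := humans ++ [temp1]
  let objects := objects ++ [temp2]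
  let temp1 := human_t.map (fun (x, y, z, w) => (y, x, z, w))
  let temp2 := object_t.map (fun (x, y, z, w) => (y, x, z, w))
  let humans := humans ++ [temp1]
  let objects := objects ++ [temp2]
  let temp1 := human_t.map (fun (x, y, z, w) => (z, x, y, w))
  let temp2 := object_t.map (fun (x, y, z, w) => (z, x, y, w))
  let humans := humans ++ [temp1]
  let objects := objects ++ [temp2]
  let temp1 := human_t.map (fun (x, y, z, w) => (z, y, x, w))
  let temp2 := object_t.map (fun (x, y, z, w) => (z, y, x, w))
  let humans := humans ++ [temp1]
  let objects := objects ++ [temp2]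
  (humans, objects)

-- ===== PORT B =====
-- the loop body of Source B's _six_variants: six accumulators updated per tuple,
-- variants produced by cyclic rotation (a,b,c) ↦ (b,c,a)
def pvSixStep
    (s : List (Int × Int × Int × Int) × List (Int × Int × Int × Int) × List (Int × Int × Int × Int) ×
         List (Int × Int × Int × Int) × List (Int × Int × Int × Int) × List (Int × Int × Int × Int))
    (t : Int × Int × Int × Int) :
    List (Int × Int × Int × Int) × List (Int × Int × Int × Int) × List (Int × Int × Int × Int) ×
    List (Int × Int × Int × Int) × List (Int × Int × Int × Int) × List (Int × Int × Int × Int) :=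
  match s, t with
  | (c0, c1, c2, c3, c4, c5), (x, y, z, w) =>
    let a := x; let b := y; let c := z
    let c0 := c0 ++ [(a, b, c, w)]
    let c1 := c1 ++ [(a, c, b, w)]
    let (a, b, c) := (b, c, a)
    let c2 := c2 ++ [(a, b, c, w)]
    let c3 := c3 ++ [(a, c, b, w)]
    let (a, b, c) := (b, c, a)
    let c4 := c4 ++ [(a, b, c, w)]
    let c5 := c5 ++ [(a, c, b, w)]
    (c0, c1, c2, c3, c4, c5)

def pvSixVariants (tuples : List (Int × Int × Int × Int)) : List (List (Int × Int × Int × Int)) :=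
  match tuples.foldl pvSixStep ([], [], [], [], [], []) with
  | (c0, c1, c2, c3, c4, c5) => [c0, c1, c2, c3, c4, c5]

def get_tuple_list_alt (human_t : List (Int × Int × Int × Int)) (object_t : List (Int × Int × Int × Int)) : (List (List (Int × Int × Int × Int))) × (List (List (Int × Int × Int × Int))) :=
  (pvSixVariants human_t, pvSixVariants object_t)

-- ===== PRECONDITION & SPEC =====
def Spec_get_tuple_list (human_t : List (Int × Int × Int × Int)) (object_t : List (Int × Int × Int × Int)) (out : (List (List (Int × Int × Int × Int))) × (List (List (Int × Int × Int × Int)))) : Prop := out = get_tuple_list_alt human_t object_t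
instance (human_t : List (Int × Int × Int × Int)) (object_t : List (Int × Int × Int × Int)) (out : (List (List (Int × Int × Int × Int))) × (List (List (Int × Int × Int × Int)))) : Decidable (Spec_get_tuple_list human_t object_t out) := by unfold Spec_get_tuple_list; exact @instDecidableEqProd _ _ inferInstance inferInstance _ _

-- ===== CLAIM (what is proved, stated in full; the proofs are below) =====
def Claim_equal_get_tuple_list : Prop := ∀ (human_t : List (Int × Int × Int × Int)) (object_t : List (Int × Int × Int × Int)), Dom_get_tuple_list human_t object_t → Spec_get_tuple_list human_t object_t (get_tuple_list human_t object_t)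

-- ===== LEMMAS AND PROOFS =====
theorem pvSixStep_foldl (l : List (Int × Int × Int × Int))
    (c0 c1 c2 c3 c4 c5 : List (Int × Int × Int × Int)) :
    l.foldl pvSixStep (c0, c1, c2, c3, c4, c5)
    = (c0 ++ l.map (fun (x, y, z, w) => (x, y, z, w)),
       c1 ++ l.map (fun (x, y, z, w) => (x, z, y, w)),
       c2 ++ l.map (fun (x, y, z, w) => (y, z, x, w)),
       c3 ++ l.map (fun (x, y, z, w) => (y, x, z, w)),
       c4 ++ l.map (fun (x, y, z, w) => (z, x, y, w)),
       c5 ++ l.map (fun (x, y, z, w) => (z, y, x, w))) := by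
  induction l generalizing c0 c1 c2 c3 c4 c5 with
  | nil => simp
  | cons h t ih =>
    obtain ⟨x, y, z, w⟩ := h
    simp [pvSixStep, ih]

theorem pvSixVariants_eq (l : List (Int × Int × Int × Int)) :
    pvSixVariants l
    = [l.map (fun (x, y, z, w) => (x, y, z, w)),
       l.map (fun (x, y, z, w) => (x, z, y, w)),
       l.map (fun (x, y, z, w) => (y, z, x, w)),
       l.map (fun (x, y, z, w) => (y, x, z, w)),
       l.map (fun (x, y, z, w) => (z, x, y, w)),
       l.map (fun (x, y, z, w) => (z, y, x, w))] := by
  unfold pvSixVariants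
  rw [pvSixStep_foldl]
  simp

-- ===== VERDICT (by name: the statement is the Claim_ definition above) =====
theorem get_tuple_list_spec : Claim_equal_get_tuple_list := by
  intro human_t object_t _
  unfold Spec_get_tuple_list get_tuple_list get_tuple_list_alt
  simp [pvSixVariants_eq]
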